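-- pv_equiv track=rewrite | github.com/gabefoley/ancestralcost | ancestralcost/indel_placement.py | fill_in_phylo_contigs
-- ===== SOURCE A (Python) =====
-- from collections import defaultdict
--
-- def fill_in_phylo_contigs(phylo_contigs, length, skip=[]):
--     complete_phylo_contigs = defaultdict(list)
--     # If there are no restrictions on which positions we have to add into (i.e. the sequence is blank at this point,
--     # we can add in any combination
--
--     if phylo_contigs == []:
--         complete_phylo_contigs["rmv"].append([x for x in range(0, length)])
--         complete_phylo_contigs["add"].append([x for x in range(0, length)])
--
--     for idx, pos in enumerate(phylo_contigs):
--         present = []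
--         if idx + 1 <= len(phylo_contigs):
--             if pos != 0:
--                 complete_phylo_contigs["rmv"].append(
--                     [x for x in range(0, pos) if x not in skip]
--                 )
--
--             present.append(pos)
--             while idx + 1 < len(phylo_contigs):
--                 next = phylo_contigs[idx + 1]
--
--                 if next == pos + 1:
--                     present.append(next)
--                 else:
--                     complete_phylo_contigs["add"].append(
--                         [x for x in present if x not in skip]
--                     )
--                     complete_phylo_contigs["rmv"].append(
--                         [x for x in range(present[-1] + 1, next) if x not in skip]
--                     )
--                     present = []
--
--                 pos = next
--                 if next not in present:
--                     present.append(next)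
--                 idx += 1
--             if len(present) > 0:
--                 complete_phylo_contigs["add"].append(
--                     [x for x in present if x not in skip]
--                 )
--             if pos != length and pos != length - 1:
--                 complete_phylo_contigs["rmv"].append(
--                     [x for x in range(pos + 1, length) if x not in skip]
--                 )
--             break
--
--     if len(complete_phylo_contigs) == 0:
--         complete_phylo_contigs["rmv"].append([x for x in range(0, length)])
--         complete_phylo_contigs["add"].append([x for x in range(0, length)])
--
--     return complete_phylo_contigs
-- ===== SOURCE B (Python) =====
-- from collections import defaultdict
-- from itertools import groupby
--
--
-- def fill_in_phylo_contigs(phylo_contigs, length, skip=[]):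
--     result = defaultdict(list)
--
--     # Nothing is constrained: any combination of positions can be removed or added.
--     if not phylo_contigs:
--         result["rmv"].append(list(range(length)))
--         result["add"].append(list(range(length)))
--         return result
--
--     # Phase 1: maximal runs of consecutive values (constant value-minus-index key).
--     runs = [[p for _, p in g]
--             for _, g in groupby(enumerate(phylo_contigs), key=lambda t: t[1] - t[0])]
--
--     def keep(xs):
--         return [x for x in xs if x not in skip]
--
--     # Phase 2: walk the runs, emitting the gap before, between and after them.
--     if runs[0][0] != 0:
--         result["rmv"].append(keep(range(runs[0][0])))
--     for run, nxt in zip(runs, runs[1:]):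
--         result["add"].append(keep(run))
--         result["rmv"].append(keep(range(run[-1] + 1, nxt[0])))
--     result["add"].append(keep(runs[-1]))
--     last = runs[-1][-1]
--     if last != length and last != length - 1:
--         result["rmv"].append(keep(range(last + 1, length)))
--
--     return result
-- ===== Notes on version B (the rewrite author's own statement) =====
-- stated objective: alternative
-- what changed: A discovers runs on the fly inside a nested while loop with mutable present/pos/idx state and interleaved branching; B first groups the positions into maximal consecutive runs (itertools.groupby on value-minus-index), then assembles the result in one straight pass over that runs list (leading gap, each run with its following gap, trailing gap).
import Mathlib
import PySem

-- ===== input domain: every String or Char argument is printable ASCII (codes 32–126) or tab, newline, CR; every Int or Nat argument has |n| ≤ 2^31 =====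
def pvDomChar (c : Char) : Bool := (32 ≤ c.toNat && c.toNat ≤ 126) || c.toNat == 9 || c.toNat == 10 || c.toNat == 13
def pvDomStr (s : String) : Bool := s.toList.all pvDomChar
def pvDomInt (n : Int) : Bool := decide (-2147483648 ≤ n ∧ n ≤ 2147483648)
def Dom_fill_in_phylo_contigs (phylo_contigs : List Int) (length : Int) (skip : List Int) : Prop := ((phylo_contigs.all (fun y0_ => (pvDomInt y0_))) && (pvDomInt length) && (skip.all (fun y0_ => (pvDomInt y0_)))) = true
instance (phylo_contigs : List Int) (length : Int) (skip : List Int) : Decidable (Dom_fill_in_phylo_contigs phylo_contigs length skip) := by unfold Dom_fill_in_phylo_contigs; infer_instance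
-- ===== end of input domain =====

-- B groups the positions into maximal consecutive runs first and then assembles the result in one
-- straight pass over the runs list, instead of A's nested while loop with mutable state; alternative
-- decomposition, same complexity.

-- ===== PORT A =====
-- complete_phylo_contigs[k].append(v) on a defaultdict(list)
def pvAppendA (d : PySem.Dict String (List (List Int))) (k : String) (v : List Int) :
    PySem.Dict String (List (List Int)) :=
  d.insert k (d.getD k [] ++ [v])

-- the inner `while idx + 1 < len(phylo_contigs)` loop; `rest` is the part of the list after idx
def pvWhileA (skip : List Int) (rest : List Int) (present : List Int) (pos : Int)
    (d : PySem.Dict String (List (List Int))) :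
    List Int × Int × PySem.Dict String (List (List Int)) :=
  match rest with
  | [] => (present, pos, d)
  | next :: rest' =>
    let pd :=
      if next = pos + 1 then (present ++ [next], d)
      else (([] : List Int),
        pvAppendA
          (pvAppendA d "add" (present.filter (fun x => !skip.contains x)))
          "rmv" ((PySem.List.pyRange (present.getLastD 0 + 1) next 1).filter (fun x => !skip.contains x)))
    let pos' := next
    let present' := if pd.1.contains next then pd.1 else pd.1 ++ [next]
    pvWhileA skip rest' present' pos' pd.2

def fill_in_phylo_contigs (phylo_contigs : List Int) (length : Int) (skip : List Int) :
    List (String × List (List Int)) :=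
  let d : PySem.Dict String (List (List Int)) := PySem.Dict.empty
  let d :=
    if phylo_contigs = [] then
      pvAppendA (pvAppendA d "rmv" (PySem.List.pyRange 0 length 1)) "add" (PySem.List.pyRange 0 length 1)
    else d
  -- the for loop body runs once (idx = 0) and then breaks
  let d :=
    match phylo_contigs with
    | [] => d
    | pos :: rest =>
      let d := if pos ≠ 0 then
          pvAppendA d "rmv" ((PySem.List.pyRange 0 pos 1).filter (fun x => !skip.contains x))
        else d
      let r := pvWhileA skip rest [pos] pos d
      let d := if r.1.length > 0 then
          pvAppendA r.2.2 "add" (r.1.filter (fun x => !skip.contains x))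
        else r.2.2
      if r.2.1 ≠ length ∧ r.2.1 ≠ length - 1 then
        pvAppendA d "rmv" ((PySem.List.pyRange (r.2.1 + 1) length 1).filter (fun x => !skip.contains x))
      else d
  let d :=
    if d.size = 0 then
      pvAppendA (pvAppendA d "rmv" (PySem.List.pyRange 0 length 1)) "add" (PySem.List.pyRange 0 length 1)
    else d
  d.items

-- ===== PORT B =====
-- result[k].append(v) on the defaultdict(list)
def pvAppendB (d : PySem.Dict String (List (List Int))) (k : String) (v : List Int) :
    PySem.Dict String (List (List Int)) :=
  d.insert k (d.getD k [] ++ [v])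

-- groupby(enumerate(pcs), key=t[1]-t[0]): the key is constant across adjacent elements
-- exactly when each next element equals the previous one + 1, so a new group starts at v ≠ last+1.
def pvRunsGo (cur : List Int) (xs : List Int) : List (List Int) :=
  match xs with
  | [] => [cur]
  | v :: xs' =>
    if v = cur.getLastD 0 + 1 then pvRunsGo (cur ++ [v]) xs'
    else cur :: pvRunsGo [v] xs'

-- keep(xs) = [x for x in xs if x not in skip]
def pvKeepB (skip : List Int) (xs : List Int) : List Int :=
  xs.filter (fun x => !skip.contains x)

def fill_in_phylo_contigs_alt (phylo_contigs : List Int) (length : Int) (skip : List Int) :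
    List (String × List (List Int)) :=
  match phylo_contigs with
  | [] =>
    (pvAppendB (pvAppendB PySem.Dict.empty "rmv" (PySem.List.pyRange 0 length 1))
      "add" (PySem.List.pyRange 0 length 1)).items
  | p :: rest =>
    let runs := pvRunsGo [p] rest
    let first := (runs.headD []).headD 0
    let d : PySem.Dict String (List (List Int)) := PySem.Dict.empty
    let d := if first ≠ 0 then pvAppendB d "rmv" (pvKeepB skip (PySem.List.pyRange 0 first 1)) else d
    let d := (runs.zip runs.tail).foldl (fun d ab =>
        pvAppendB (pvAppendB d "add" (pvKeepB skip ab.1))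
          "rmv" (pvKeepB skip (PySem.List.pyRange (ab.1.getLastD 0 + 1) (ab.2.headD 0) 1))) d
    let d := pvAppendB d "add" (pvKeepB skip (runs.getLastD []))
    let last := (runs.getLastD []).getLastD 0
    let d := if last ≠ length ∧ last ≠ length - 1 then
        pvAppendB d "rmv" (pvKeepB skip (PySem.List.pyRange (last + 1) length 1))
      else d
    d.items

-- ===== PRECONDITION & SPEC =====
def Spec_fill_in_phylo_contigs (phylo_contigs : List Int) (length : Int) (skip : List Int) (out : List (String × List (List Int))) : Prop := out = fill_in_phylo_contigs_alt phylo_contigs length skip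
instance (phylo_contigs : List Int) (length : Int) (skip : List Int) (out : List (String × List (List Int))) : Decidable (Spec_fill_in_phylo_contigs phylo_contigs length skip out) := by unfold Spec_fill_in_phylo_contigs; infer_instance

-- ===== CLAIM (what is proved, stated in full; the proofs are below) =====
def Claim_equal_fill_in_phylo_contigs : Prop := ∀ (phylo_contigs : List Int) (length : Int) (skip : List Int), Dom_fill_in_phylo_contigs phylo_contigs length skip → Spec_fill_in_phylo_contigs phylo_contigs length skip (fill_in_phylo_contigs phylo_contigs length skip)

-- ===== LEMMAS AND PROOFS =====

-- the sequence of dict appends A's while loop performs, indexed by the runs it discovers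
def pvEmitP (skip : List Int) (d : PySem.Dict String (List (List Int))) :
    List (List Int) → PySem.Dict String (List (List Int))
  | [] => d
  | [_] => d
  | r :: r' :: rs =>
    pvEmitP skip
      (pvAppendA (pvAppendA d "add" (pvKeepB skip r)) "rmv"
        (pvKeepB skip (PySem.List.pyRange (r.getLastD 0 + 1) (r'.headD 0) 1)))
      (r' :: rs)

theorem pvEmitP_single (skip : List Int) (d : PySem.Dict String (List (List Int))) (r : List Int) :
    pvEmitP skip d [r] = d := rfl

theorem pvEmitP_cons₂ (skip : List Int) (d : PySem.Dict String (List (List Int)))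
    (r r' : List Int) (rs : List (List Int)) :
    pvEmitP skip d (r :: r' :: rs) =
      pvEmitP skip
        (pvAppendA (pvAppendA d "add" (pvKeepB skip r)) "rmv"
          (pvKeepB skip (PySem.List.pyRange (r.getLastD 0 + 1) (r'.headD 0) 1)))
        (r' :: rs) := rfl

theorem pvRunsGo_ne_nil (xs cur : List Int) : pvRunsGo cur xs ≠ [] := by
  induction xs generalizing cur with
  | nil => simp [pvRunsGo]
  | cons v xs' ih => simp only [pvRunsGo]; split <;> simp [ih]

theorem pvRunsGo_headHead (xs cur : List Int) (h : cur ≠ []) :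
    ((pvRunsGo cur xs).headD []).headD 0 = cur.headD 0 := by
  induction xs generalizing cur with
  | nil => simp [pvRunsGo]
  | cons v xs' ih =>
    simp only [pvRunsGo]
    split
    · rw [ih (cur ++ [v]) (by simp)]
      cases cur with
      | nil => exact absurd rfl h
      | cons a l => simp
    · simp

theorem pvRunsGo_last_ne_nil (xs cur : List Int) (h : cur ≠ []) :
    (pvRunsGo cur xs).getLastD [] ≠ [] := by
  induction xs generalizing cur with
  | nil => simpa [pvRunsGo]
  | cons v xs' ih =>
    simp only [pvRunsGo]
    split
    · exact ih (cur ++ [v]) (by simp)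
    · have h2 := ih [v] (by simp)
      have h3 := pvRunsGo_ne_nil xs' [v]
      cases hr : pvRunsGo [v] xs' with
      | nil => exact absurd hr h3
      | cons a l => rw [hr] at h2; simpa using h2

theorem pvWhileA_eq (skip : List Int) (rest present : List Int) (pos : Int)
    (d : PySem.Dict String (List (List Int)))
    (hne : present ≠ []) (hpos : present.getLastD 0 = pos) :
    pvWhileA skip rest present pos d =
      ((pvRunsGo present rest).getLastD [],
       ((pvRunsGo present rest).getLastD []).getLastD 0,
       pvEmitP skip d (pvRunsGo present rest)) := by
  induction rest generalizing present pos d with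
  | nil =>
    subst hpos
    simp [pvWhileA, pvRunsGo, pvEmitP_single]
  | cons next rest' ih =>
    by_cases h : next = pos + 1
    · have hcond : next = present.getLastD 0 + 1 := by rw [hpos]; exact h
      have hstep : pvWhileA skip (next :: rest') present pos d
          = pvWhileA skip rest' (present ++ [next]) next d := by
        conv_lhs => rw [pvWhileA.eq_def]
        simp [if_pos h]
      have hruns : pvRunsGo present (next :: rest') = pvRunsGo (present ++ [next]) rest' := by
        conv_lhs => rw [pvRunsGo.eq_def]
        simp [hcond]
      rw [hstep, ih (present ++ [next]) next d (by simp) (by simp), hruns]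
    · have hcond : ¬ next = present.getLastD 0 + 1 := by rw [hpos]; exact h
      have hruns : pvRunsGo present (next :: rest') = present :: pvRunsGo [next] rest' := by
        simp only [pvRunsGo]
        rw [if_neg hcond]
      have hstep : pvWhileA skip (next :: rest') present pos d =
          pvWhileA skip rest' [next] next
            (pvAppendA (pvAppendA d "add" (present.filter (fun x => !skip.contains x))) "rmv"
              ((PySem.List.pyRange (present.getLastD 0 + 1) next 1).filter (fun x => !skip.contains x))) := by
        conv_lhs => rw [pvWhileA.eq_def]
        simp [if_neg h]
      rw [hstep, ih [next] next _ (by simp) (by simp), hruns]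
      have h3 := pvRunsGo_ne_nil rest' [next]
      cases hr : pvRunsGo [next] rest' with
      | nil => exact absurd hr h3
      | cons r' rs =>
        have hhd : r'.headD 0 = next := by
          have h4 := pvRunsGo_headHead rest' [next] (by simp)
          rw [hr] at h4; simpa using h4
        simp only [Prod.mk.injEq]
        refine ⟨?_, ?_, ?_⟩
        · simp only [List.getLastD_cons]
        · simp only [List.getLastD_cons]
        · conv_rhs => rw [pvEmitP_cons₂]
          rw [hhd]
          simp only [pvKeepB]

-- A's emit sequence over the runs is exactly B's fold over consecutive pairs of runs
theorem pvEmitP_eq_foldl (skip : List Int) (rs : List (List Int))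
    (d : PySem.Dict String (List (List Int))) :
    pvEmitP skip d rs =
      (rs.zip rs.tail).foldl (fun d ab =>
        pvAppendB (pvAppendB d "add" (pvKeepB skip ab.1))
          "rmv" (pvKeepB skip (PySem.List.pyRange (ab.1.getLastD 0 + 1) (ab.2.headD 0) 1))) d := by
  induction rs generalizing d with
  | nil => rfl
  | cons r tail ih =>
    cases tail with
    | nil => rfl
    | cons r' rs' =>
      rw [pvEmitP_cons₂, ih]
      rfl

-- ===== VERDICT =====
theorem pvInsert_items_ne_nil {k v : Type} [BEq k] (d : PySem.Dict k v) (key : k) (val : v) :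
    (d.insert key val).items ≠ [] := by
  cases d with
  | mk l =>
    induction l with
    | nil => simp [PySem.Dict.insert]
    | cons p t ih => simp [PySem.Dict.insert]; split <;> simp_all [PySem.Dict.insert]

theorem fill_in_phylo_contigs_spec : Claim_equal_fill_in_phylo_contigs := by
  intro pcs length skip _
  unfold Spec_fill_in_phylo_contigs
  cases pcs with
  | nil => rfl
  | cons p rest =>
    show fill_in_phylo_contigs (p :: rest) length skip = _
    unfold fill_in_phylo_contigs fill_in_phylo_contigs_alt
    simp only []
    rw [pvWhileA_eq skip rest [p] p _ (by simp) (by simp)]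
    have hlen : ((pvRunsGo [p] rest).getLastD []).length > 0 := by
      cases hL : (pvRunsGo [p] rest).getLastD [] with
      | nil => exact absurd hL (pvRunsGo_last_ne_nil rest [p] (by simp))
      | cons a l => simp
    have hfst : ((pvRunsGo [p] rest).headD []).headD 0 = p := by
      simpa using pvRunsGo_headHead rest [p] (by simp)
    simp only [pvEmitP_eq_foldl, hfst, if_pos hlen, pvKeepB, pvAppendB, pvAppendA]
    by_cases hp : p = 0
    · subst hp
      by_cases hc : ¬((pvRunsGo [(0 : Int)] rest).getLast?.getD []).getLast?.getD 0 = length ∧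
          ¬((pvRunsGo [(0 : Int)] rest).getLast?.getD []).getLast?.getD 0 = length - 1 <;>
        simp [hc, PySem.Dict.size, pvInsert_items_ne_nil]
    · by_cases hc : ¬((pvRunsGo [p] rest).getLast?.getD []).getLast?.getD 0 = length ∧
          ¬((pvRunsGo [p] rest).getLast?.getD []).getLast?.getD 0 = length - 1 <;>
        simp [hp, hc, PySem.Dict.size, pvInsert_items_ne_nil]
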